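-- pv_equiv track=rewrite | github.com/thetrotfreak/MCA171 | lab/test/1/1.py | sellMovieTickets
-- ===== SOURCE A (Python) =====
-- def sellMovieTickets(cash):
--     """Sell move tickets to all or none"""
--
--     cash_reserve = {250: 0, 500: 0, 1000: 0}
--
--     def increment(k):
--         cash_reserve[k] = cash_reserve[k] + 1
--
--     can_sell_all = True
--     for money in cash:
--         if money == 250:
--             increment(250)
--         elif money == 500:
--             increment(500)
--         elif money == 1000:
--             increment(1000)
--         else:
--             pass
--
--     for money in cash:
--         if money == 500:
--             if 250 * cash_reserve[250] != 500 * cash_reserve[500] // 2: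
--                 can_sell_all = False
--                 break
--         elif money == 1000:
--             if (
--                 250 * cash_reserve[250] != (1000 * cash_reserve[1000]) // 4
--                 or 500 * cash_reserve[500] != (1000 * cash_reserve[1000]) // 2
--             ):
--                 can_sell_all = False
--                 break
--         else:
--             pass
--
--     return can_sell_all
-- ===== SOURCE B (Python) =====
-- def sellMovieTickets(cash):
--     """Sell move tickets to all or none"""
--     c250 = cash.count(250)
--     c500 = cash.count(500)
--     c1000 = cash.count(1000)
--     return not ((c500 > 0 and c250 != c500)
--                 or (c1000 > 0 and (c250 != c1000 or c500 != c1000)))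
-- ===== Notes on version B (the rewrite author's own statement) =====
-- stated objective: simpler
-- what changed: Replaced the dict-building pass plus a second break-out scan of cash by three counts and one constant-size boolean formula (a 500 appears in cash iff its count is positive, and the //2, //4 arithmetic reduces to equality of counts).
import Mathlib
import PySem

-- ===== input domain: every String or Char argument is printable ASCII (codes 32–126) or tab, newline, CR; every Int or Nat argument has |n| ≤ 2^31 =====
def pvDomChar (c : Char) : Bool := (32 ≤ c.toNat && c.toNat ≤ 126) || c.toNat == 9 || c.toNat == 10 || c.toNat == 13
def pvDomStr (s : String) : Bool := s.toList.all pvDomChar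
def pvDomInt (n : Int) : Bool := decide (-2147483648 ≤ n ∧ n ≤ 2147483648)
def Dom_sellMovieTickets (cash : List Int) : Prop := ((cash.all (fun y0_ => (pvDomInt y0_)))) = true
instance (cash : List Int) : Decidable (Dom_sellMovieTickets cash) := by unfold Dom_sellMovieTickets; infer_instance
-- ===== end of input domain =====

-- B replaces A's dict-building pass plus second break-out scan by three counts and one
-- constant-size boolean formula (objective: simpler; same exact result).

-- ===== PORT A =====
-- the second 'for money in cash' loop with its early 'break'
def sellCheckLoop (d : PySem.Dict Int Int) : List Int → Bool
  | [] => true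
  | money :: rest =>
    if money == 500 then
      if 250 * d.getD 250 0 ≠ PySem.Int.floordiv (500 * d.getD 500 0) 2 then false
      else sellCheckLoop d rest
    else if money == 1000 then
      if 250 * d.getD 250 0 ≠ PySem.Int.floordiv (1000 * d.getD 1000 0) 4
         ∨ 500 * d.getD 500 0 ≠ PySem.Int.floordiv (1000 * d.getD 1000 0) 2 then false
      else sellCheckLoop d rest
    else sellCheckLoop d rest

def sellMovieTickets (cash : List Int) : Bool :=
  let reserve0 : PySem.Dict Int Int := PySem.Dict.ofList [(250, 0), (500, 0), (1000, 0)]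
  -- increment(k) is cash_reserve[k] = cash_reserve[k] + 1
  let reserve := cash.foldl (fun d money =>
    if money == 250 then d.modify 250 0 (· + 1)
    else if money == 500 then d.modify 500 0 (· + 1)
    else if money == 1000 then d.modify 1000 0 (· + 1)
    else d) reserve0
  sellCheckLoop reserve cash

-- ===== PORT B =====
def sellMovieTickets_alt (cash : List Int) : Bool :=
  let c250 := PySem.List.count cash 250
  let c500 := PySem.List.count cash 500
  let c1000 := PySem.List.count cash 1000
  !((decide (c500 > 0) && decide (c250 ≠ c500))
    || (decide (c1000 > 0) && (decide (c250 ≠ c1000) || decide (c500 ≠ c1000))))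

-- ===== PRECONDITION & SPEC =====
def Spec_sellMovieTickets (cash : List Int) (out : Bool) : Prop := out = sellMovieTickets_alt cash
instance (cash : List Int) (out : Bool) : Decidable (Spec_sellMovieTickets cash out) := by unfold Spec_sellMovieTickets; infer_instance

-- ===== CLAIM (what is proved, stated in full; the proofs are below) =====
def Claim_equal_sellMovieTickets : Prop := ∀ (cash : List Int), Dom_sellMovieTickets cash → Spec_sellMovieTickets cash (sellMovieTickets cash)

-- ===== LEMMAS AND PROOFS =====

-- the counting fold stored into the reserve dict: each of the three keys ends at its count
theorem sell_fold_getD (cash : List Int) (d : PySem.Dict Int Int) (k : Int)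
    (hk : k = 250 ∨ k = 500 ∨ k = 1000) :
    (cash.foldl (fun d money =>
      if money == 250 then d.modify 250 0 (· + 1)
      else if money == 500 then d.modify 500 0 (· + 1)
      else if money == 1000 then d.modify 1000 0 (· + 1)
      else d) d).getD k 0 = d.getD k 0 + (cash.count k : Int) := by
  induction cash generalizing d with
  | nil => simp
  | cons m rest ih =>
    simp only [List.foldl_cons, List.count_cons]
    rcases hk with rfl | rfl | rfl <;>
      by_cases h1 : m = 250 <;> by_cases h2 : m = 500 <;> by_cases h3 : m = 1000 <;>
        simp_all [PySem.Dict.getD_modify] <;> omega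

-- the break-out scan is a pure predicate of membership and the dict values
theorem sellCheckLoop_eq (d : PySem.Dict Int Int) (cash : List Int) :
    sellCheckLoop d cash =
      !((decide (500 ∈ cash) && decide (250 * d.getD 250 0 ≠ PySem.Int.floordiv (500 * d.getD 500 0) 2))
        || (decide ((1000 : Int) ∈ cash) &&
            decide (250 * d.getD 250 0 ≠ PySem.Int.floordiv (1000 * d.getD 1000 0) 4
              ∨ 500 * d.getD 500 0 ≠ PySem.Int.floordiv (1000 * d.getD 1000 0) 2))) := by
  induction cash with
  | nil => simp [sellCheckLoop]
  | cons m rest ih =>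
    by_cases h2 : m = 500 <;> by_cases h3 : m = 1000 <;>
      by_cases p1 : 250 * d.getD 250 0 = PySem.Int.floordiv (500 * d.getD 500 0) 2 <;>
      by_cases p2 : 250 * d.getD 250 0 = PySem.Int.floordiv (1000 * d.getD 1000 0) 4 <;>
      by_cases p3 : 500 * d.getD 500 0 = PySem.Int.floordiv (1000 * d.getD 1000 0) 2 <;>
      simp_all [sellCheckLoop, ne_comm] <;>
      simp [show ¬((500:Int) = m) from fun h => h2 h.symm, show ¬((1000:Int) = m) from fun h => h3 h.symm]

-- ===== VERDICT (by name: the statement is the Claim_ definition above) =====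
theorem sellMovieTickets_spec : Claim_equal_sellMovieTickets := by
  intro cash _
  show sellMovieTickets cash = sellMovieTickets_alt cash
  unfold sellMovieTickets sellMovieTickets_alt
  rw [sellCheckLoop_eq,
      sell_fold_getD cash _ 250 (by norm_num),
      sell_fold_getD cash _ 500 (by norm_num),
      sell_fold_getD cash _ 1000 (by norm_num)]
  have e1 : (PySem.Dict.ofList [((250:Int), (0:Int)), (500, 0), (1000, 0)]).getD 250 0 = 0 := rfl
  have e2 : (PySem.Dict.ofList [((250:Int), (0:Int)), (500, 0), (1000, 0)]).getD 500 0 = 0 := rfl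
  have e3 : (PySem.Dict.ofList [((250:Int), (0:Int)), (500, 0), (1000, 0)]).getD 1000 0 = 0 := rfl
  rw [e1, e2, e3]
  have q1 : ((250:Int) * ((List.count (250:Int) cash : Nat) : Int) = 500 * ((List.count (500:Int) cash : Nat) : Int) / 2)
      ↔ List.count (250:Int) cash = List.count (500:Int) cash := by omega
  have q2 : ((250:Int) * ((List.count (250:Int) cash : Nat) : Int) = 1000 * ((List.count (1000:Int) cash : Nat) : Int) / 4)
      ↔ List.count (250:Int) cash = List.count (1000:Int) cash := by omega
  have q3 : ((500:Int) * ((List.count (500:Int) cash : Nat) : Int) = 1000 * ((List.count (1000:Int) cash : Nat) : Int) / 2)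
      ↔ List.count (500:Int) cash = List.count (1000:Int) cash := by omega
  simp [q1, q2, q3, PySem.List.count_eq, List.count_pos_iff]
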